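-- pv_equiv track=rewrite | github.com/hassanmzia/Eminence-HealthOS | modules/pharmacy/agents/contraindication.py | _check_qt_prolonging
-- ===== SOURCE A (Python) =====
-- def _check_qt_prolonging(meds: list[str]) -> list[str]:
--     qt_known = [
--         "azithromycin", "clarithromycin", "erythromycin",
--         "haloperidol", "quetiapine", "risperidone", "olanzapine",
--         "amiodarone", "sotalol", "dofetilide",
--         "methadone", "ondansetron", "hydroxychloroquine",
--         "ciprofloxacin", "levofloxacin", "moxifloxacin",
--     ]
--     return [med for med in meds if any(qt.lower() in med.lower() for qt in qt_known)]
-- ===== SOURCE B (Python) =====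
-- _QT_KNOWN = [
--     "azithromycin", "clarithromycin", "erythromycin",
--     "haloperidol", "quetiapine", "risperidone", "olanzapine",
--     "amiodarone", "sotalol", "dofetilide",
--     "methadone", "ondansetron", "hydroxychloroquine",
--     "ciprofloxacin", "levofloxacin", "moxifloxacin",
-- ]
--
-- # index the drug names by their first letter: at each scan position only the
-- # (at most three) names that can start with that character are tried
-- _BY_FIRST = {}
-- for _q in _QT_KNOWN:
--     _BY_FIRST.setdefault(_q[0], []).append(_q)
--
-- def _check_qt_prolonging(meds):
--     # single left-to-right sliding-window scan per med instead of one full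
--     # substring search per drug name
--     result = []
--     for med in meds:
--         low = med.lower()
--         hit = False
--         for i, ch in enumerate(low):
--             for q in _BY_FIRST.get(ch, ()):
--                 if low.startswith(q, i):
--                     hit = True
--                     break
--             if hit:
--                 break
--         if hit:
--             result.append(med)
--     return result
-- ===== Notes on version B (the rewrite author's own statement) =====
-- stated objective: alternative
-- what changed: Replaced the per-pattern loop (each of the 16 drug names substring-searched through the whole lowered med) with a single left-to-right sliding-window scan per med that, at each position, tries only the drug names from a dict indexing the 16 names by first letter.
import Mathlib
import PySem

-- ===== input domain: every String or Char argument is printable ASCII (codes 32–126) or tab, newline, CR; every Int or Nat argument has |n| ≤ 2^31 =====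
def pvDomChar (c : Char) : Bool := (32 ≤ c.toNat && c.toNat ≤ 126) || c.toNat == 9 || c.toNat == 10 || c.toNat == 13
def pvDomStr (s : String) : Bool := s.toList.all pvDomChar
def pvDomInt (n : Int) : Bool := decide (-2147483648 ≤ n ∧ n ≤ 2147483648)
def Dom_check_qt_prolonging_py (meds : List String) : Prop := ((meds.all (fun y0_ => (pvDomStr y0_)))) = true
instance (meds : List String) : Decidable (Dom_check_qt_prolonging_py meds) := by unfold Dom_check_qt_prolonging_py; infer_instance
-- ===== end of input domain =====

-- B replaces the 16-way per-pattern substring scan with one left-to-right sliding-window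
-- scan per med, trying at each position only the drug names indexed by its first letter.

-- ===== PORT A =====
def qtKnownA : List String :=
  ["azithromycin", "clarithromycin", "erythromycin",
   "haloperidol", "quetiapine", "risperidone", "olanzapine",
   "amiodarone", "sotalol", "dofetilide",
   "methadone", "ondansetron", "hydroxychloroquine",
   "ciprofloxacin", "levofloxacin", "moxifloxacin"]

def check_qt_prolonging_py (meds : List String) : List String :=
  meds.filter (fun med =>
    qtKnownA.any (fun qt =>
      PySem.Chars.isIn (PySem.Chars.lower qt.toList) (PySem.Chars.lower med.toList)))

-- ===== PORT B =====
def qtKnownB : List (List Char) :=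
  ["azithromycin".toList, "clarithromycin".toList, "erythromycin".toList,
   "haloperidol".toList, "quetiapine".toList, "risperidone".toList, "olanzapine".toList,
   "amiodarone".toList, "sotalol".toList, "dofetilide".toList,
   "methadone".toList, "ondansetron".toList, "hydroxychloroquine".toList,
   "ciprofloxacin".toList, "levofloxacin".toList, "moxifloxacin".toList]

-- _BY_FIRST: setdefault(q[0], []).append(q); q[0] = q.headD ' ' (every pattern is nonempty)
def qtByFirst : PySem.Dict Char (List (List Char)) :=
  qtKnownB.foldl (fun d q =>
    PySem.Dict.insert d (q.headD ' ') (PySem.Dict.getD d (q.headD ' ') [] ++ [q])) PySem.Dict.empty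

-- low.startswith(q, i) for 0 ≤ i ≤ len(low) is exactly: q is a prefix of low[i:];
-- the enumerate index p.1 is the Int i ≥ 0, so .toNat is exact here
def check_qt_prolonging_py_alt (meds : List String) : List String :=
  meds.foldl (fun result med =>
    let low := PySem.Chars.lower med.toList
    if (PySem.List.enumerate low).any (fun p =>
         (PySem.Dict.getD qtByFirst p.2 []).any (fun q =>
           PySem.Chars.startswith (low.drop p.1.toNat) q)) then
      result ++ [med]
    else result) []

-- ===== PRECONDITION & SPEC =====
def Spec_check_qt_prolonging_py (meds : List String) (out : List String) : Prop := out = check_qt_prolonging_py_alt meds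
instance (meds : List String) (out : List String) : Decidable (Spec_check_qt_prolonging_py meds out) := by unfold Spec_check_qt_prolonging_py; infer_instance

-- ===== CLAIM (what is proved, stated in full; the proofs are below) =====
def Claim_equal_check_qt_prolonging_py : Prop := ∀ (meds : List String), Dom_check_qt_prolonging_py meds → Spec_check_qt_prolonging_py meds (check_qt_prolonging_py meds)

-- ===== LEMMAS AND PROOFS =====

-- facts about the 16 literal patterns and their first-letter index, by evaluation
lemma qtKnownB_ne_nil : ∀ q ∈ qtKnownB, q ≠ [] := by decide

lemma mem_bucket_of_mem_qtKnownB :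
    ∀ q ∈ qtKnownB, q ∈ PySem.Dict.getD qtByFirst (q.headD ' ') [] := by decide

lemma bucket_sub_qtKnownB :
    ∀ p ∈ (qtByFirst : PySem.Dict Char (List (List Char))).items, ∀ q ∈ p.2, q ∈ qtKnownB := by decide

-- B's guarded positional scan finds a pattern iff the unguarded bounded scan does
lemma enum_scan_eq_range_scan (low : List Char) :
    ((PySem.List.enumerate low).any (fun p =>
       (PySem.Dict.getD qtByFirst p.2 []).any (fun q =>
         PySem.Chars.startswith (low.drop p.1.toNat) q)))
      = (List.range (low.length + 1)).any (fun i =>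
          qtKnownB.any (fun q => PySem.Chars.startswith (low.drop i) q)) := by
  rcases hR : (List.range (low.length + 1)).any
      (fun i => qtKnownB.any fun q => PySem.Chars.startswith (low.drop i) q) with _ | _
  · -- no pattern anywhere ⇒ the bucketed scan finds nothing either
    rw [List.any_eq_false] at hR ⊢
    rintro p hp
    obtain ⟨k, hk, rfl⟩ := (PySem.List.mem_enumerate_iff _ _ _).1 hp
    simp only [Bool.not_eq_true]
    rw [List.any_eq_false]
    intro q hq
    -- q comes from a bucket, hence from qtKnownB
    have hqB : q ∈ qtKnownB := by
      rcases hget : PySem.Dict.get? qtByFirst low[k] with _ | v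
      · rw [PySem.Dict.getD_eq_get?_getD, hget] at hq
        simp at hq
      · rw [PySem.Dict.getD_eq_get?_getD, hget] at hq
        simp only [Option.getD_some] at hq
        exact bucket_sub_qtKnownB _ (PySem.Dict.mem_items_of_get?_eq_some _ hget) q hq
    have := hR k (by simp [List.mem_range]; omega)
    simp only [Bool.not_eq_true] at this ⊢
    rw [List.any_eq_false] at this
    have := this q hqB
    simpa using this
  · -- some pattern q starts at some position i
    rw [List.any_eq_true] at hR
    obtain ⟨i, _, hi⟩ := hR
    rw [List.any_eq_true] at hi
    obtain ⟨q, hqB, hsw⟩ := hi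
    rw [PySem.Chars.startswith_iff] at hsw
    -- q is nonempty, so the match position i is a real index and low[i] is q's first letter
    have hqne : q ≠ [] := qtKnownB_ne_nil q hqB
    obtain ⟨qh, qt, rfl⟩ := List.exists_cons_of_ne_nil hqne
    have hilt : i < low.length := by
      by_contra hge
      rw [List.drop_eq_nil_of_le (by omega)] at hsw
      exact absurd (List.prefix_nil.mp hsw) (by simp)
    have hdrop : low.drop i = low[i] :: low.drop (i + 1) := List.drop_eq_getElem_cons hilt
    have hhead : qh = low[i] := by
      rw [hdrop] at hsw
      exact (List.cons_prefix_cons.mp hsw).1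
    rw [List.any_eq_true]
    refine ⟨((0 : Int) + i, low[i]), (PySem.List.mem_enumerate_iff _ _ _).2 ⟨i, hilt, rfl⟩, ?_⟩
    rw [List.any_eq_true]
    refine ⟨qh :: qt, ?_, ?_⟩
    · have := mem_bucket_of_mem_qtKnownB _ hqB
      simpa [hhead] using this
    · have : ((0 : Int) + i).toNat = i := by omega
      rw [this, PySem.Chars.startswith_iff]
      exact hsw

-- a bounded position scan finds a pattern iff it is a substring
lemma range_startswith_eq_isIn (q s : List Char) :
    (List.range (s.length + 1)).any (fun i => PySem.Chars.startswith (s.drop i) q)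
      = PySem.Chars.isIn q s := by
  rcases h : PySem.Chars.isIn q s with _ | _
  · rw [List.any_eq_false]
    intro i _
    simp only [PySem.Chars.startswith_iff]
    intro hpre
    have hx : ∃ j, q <+: s.drop j := ⟨i, hpre⟩
    rw [PySem.Chars.exists_prefix_drop_iff_isIn] at hx
    simp [h] at hx
  · rw [List.any_eq_true]
    obtain ⟨j, hj⟩ := (PySem.Chars.exists_prefix_drop_iff_isIn q s).2 h
    refine ⟨min j s.length, by simp [List.mem_range], ?_⟩
    rw [PySem.Chars.startswith_iff]
    rcases Nat.le_total j s.length with hle | hge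
    · simpa [min_eq_left hle] using hj
    · have hnil : s.drop j = [] := by simp; omega
      rw [hnil] at hj
      have hq : q = [] := List.prefix_nil.mp hj
      simp [hq]

-- the two per-med conditions agree
lemma cond_eq (med : String) :
    ((PySem.List.enumerate (PySem.Chars.lower med.toList)).any (fun p =>
       (PySem.Dict.getD qtByFirst p.2 []).any (fun q =>
         PySem.Chars.startswith ((PySem.Chars.lower med.toList).drop p.1.toNat) q)))
      = qtKnownA.any (fun qt =>
          PySem.Chars.isIn (PySem.Chars.lower qt.toList) (PySem.Chars.lower med.toList)) := by
  have hlist : qtKnownA.map (fun qt => PySem.Chars.lower qt.toList) = qtKnownB := by decide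
  set low := PySem.Chars.lower med.toList with hlow
  rw [enum_scan_eq_range_scan low, ← hlist]
  rcases hA : (qtKnownA.any fun qt => PySem.Chars.isIn (PySem.Chars.lower qt.toList) low) with _ | _
  · rw [List.any_eq_false] at hA ⊢
    intro i _
    simp only [Bool.not_eq_true]
    rw [List.any_eq_false]
    intro q hq
    rw [List.mem_map] at hq
    obtain ⟨qt, hqt, rfl⟩ := hq
    have hA' := hA qt hqt
    simp only [Bool.not_eq_true] at hA' ⊢
    rw [← range_startswith_eq_isIn _ low, List.any_eq_false] at hA'
    have := hA' i (by assumption)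
    simpa using this
  · rw [List.any_eq_true] at hA
    obtain ⟨qt, hqt, hin⟩ := hA
    rw [← range_startswith_eq_isIn _ low, List.any_eq_true] at hin
    obtain ⟨i, hi, hsw⟩ := hin
    rw [List.any_eq_true]
    refine ⟨i, hi, ?_⟩
    rw [List.any_eq_true]
    exact ⟨PySem.Chars.lower qt.toList, List.mem_map_of_mem hqt, hsw⟩

-- ===== VERDICT (by name: the statement is the Claim_ definition above) =====
theorem check_qt_prolonging_py_spec : Claim_equal_check_qt_prolonging_py := by
  intro meds _
  unfold Spec_check_qt_prolonging_py check_qt_prolonging_py check_qt_prolonging_py_alt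
  rw [PySem.List.foldl_append_if]
  simp only [List.map_id_fun', id]
  rw [List.nil_append]
  congr 1
  funext med
  exact (cond_eq med).symm
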